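-- pv_equiv track=rewrite | github.com/jafarjtown/test_files | BinDev.py | onesAndZeros
-- ===== SOURCE A (Python) =====
-- def onesAndZeros(num):
--     lst_num = list(num)
--     result = ''
--     count_ones = 0
--     for n in lst_num:
--         if int(n) == 0:
--             result += n
--             count_ones = 0
--         else:
--             count_ones += 1
--             if count_ones == 3:
--                 result += '1'
--                 count_ones = 0
--             else:
--                 result += '0'
--     return result
-- ===== SOURCE B (Python) =====
-- def onesAndZeros(num):
--     out = []
--     rest = num
--     while rest:
--         z = int(rest[0]) == 0
--         i = 1
--         while i < len(rest) and (int(rest[i]) == 0) == z: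
--             i += 1
--         if z:
--             out.append('0' * i)
--         else:
--             out.append(''.join('1' if (k + 1) % 3 == 0 else '0' for k in range(i)))
--         rest = rest[i:]
--     return ''.join(out)
-- ===== Notes on version B (the rewrite author's own statement) =====
-- stated objective: alternative
-- what changed: Replaces A's single pass with a running ones-counter by a run-decomposition: the string is cut into maximal runs of zeros / nonzeros and each run is rendered independently ('0'*L for zeros, '1' at every third index within a nonzero run).
import Mathlib
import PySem

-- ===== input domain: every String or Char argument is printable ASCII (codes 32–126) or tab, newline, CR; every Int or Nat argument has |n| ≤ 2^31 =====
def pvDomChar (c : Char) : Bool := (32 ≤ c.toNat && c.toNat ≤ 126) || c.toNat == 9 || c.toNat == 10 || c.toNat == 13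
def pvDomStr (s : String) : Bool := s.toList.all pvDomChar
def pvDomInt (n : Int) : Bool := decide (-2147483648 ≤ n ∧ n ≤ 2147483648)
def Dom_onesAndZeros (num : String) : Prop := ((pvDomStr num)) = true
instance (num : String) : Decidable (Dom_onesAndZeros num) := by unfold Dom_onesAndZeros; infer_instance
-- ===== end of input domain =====

-- B replaces A's running ones-counter by cutting the string into maximal zero/nonzero runs
-- and rendering each run independently (alternative decomposition, same O(n) cost).

-- ===== PORT A =====
-- A: one left-to-right pass; `int(n)` on a single char raises ValueError on non-digits
-- (those inputs are excluded by Pre_onesAndZeros; the `none` branch below is unreachable there).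
def onesAndZeros (num : String) : String :=
  let lst_num := num.toList
  let st := lst_num.foldl (fun (st : List Char × Int) n =>
    match PySem.Int.ofChars? [n] with
    | none => st   -- int(n) raises ValueError here; outside Pre_onesAndZeros
    | some v =>
      if v == 0 then (st.1 ++ [n], 0)
      else
        let count_ones := st.2 + 1
        if count_ones == 3 then (st.1 ++ ['1'], 0) else (st.1 ++ ['0'], count_ones))
    ([], 0)
  String.ofList st.1

-- ===== PORT B =====
-- int(c) == 0 for one char (the `none` branch is unreachable under Pre_onesAndZeros)
def keyZero (c : Char) : Bool :=
  match PySem.Int.ofChars? [c] with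
  | some v => v == 0
  | none => false

-- rendering of one maximal run of length L: '0' * L, or the every-third-index pattern
-- ('0' * L is ported as List.replicate, range(L) as List.range: exact for L : Nat)
def emitRun (z : Bool) (L : Nat) : List Char :=
  if z then List.replicate L '0'
  else (List.range L).map (fun k => if (k + 1) % 3 == 0 then '1' else '0')

-- the outer while loop of B: peel one maximal run (rest[0] plus the inner scan), recurse on the rest
def goB : List Char → List Char
  | [] => []
  | c :: cs =>
    emitRun (keyZero c) (1 + (cs.takeWhile (fun d => keyZero d == keyZero c)).length)
      ++ goB (cs.dropWhile (fun d => keyZero d == keyZero c))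
termination_by l => l.length
decreasing_by
  simp only [List.length_cons]
  exact Nat.lt_succ_of_le (List.length_dropWhile_le _ _)

def onesAndZeros_alt (num : String) : String :=
  String.ofList (goB num.toList)

-- ===== PRECONDITION & SPEC =====
-- Exactly the inputs on which the Python A returns: every character must be a digit,
-- otherwise int(n) raises ValueError on the first non-digit character.
def Pre_onesAndZeros (num : String) : Prop := num.toList.all PySem.Chars.isdigit = true
instance (num : String) : Decidable (Pre_onesAndZeros num) := by unfold Pre_onesAndZeros; infer_instance

def pvWitness_onesAndZeros : String := "1011101111"

def Spec_onesAndZeros (num : String) (out : String) : Prop := out = onesAndZeros_alt num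
instance (num : String) (out : String) : Decidable (Spec_onesAndZeros num out) := by unfold Spec_onesAndZeros; infer_instance

-- ===== CLAIM (what is proved, stated in full; the proofs are below) =====
def Claim_equal_onesAndZeros : Prop := ∀ (num : String), Dom_onesAndZeros num → Pre_onesAndZeros num → Spec_onesAndZeros num (onesAndZeros num)

-- ===== LEMMAS AND PROOFS =====

theorem char_eq_of_val_toNat (c d : Char) (h : c.val.toNat = d.val.toNat) : c = d := by
  apply Char.ext; exact UInt32.toNat_inj.mp h

theorem digit_cases (c : Char) (h : PySem.Chars.isdigit c = true) :
    c = '0' ∨ c = '1' ∨ c = '2' ∨ c = '3' ∨ c = '4' ∨ c = '5' ∨ c = '6' ∨ c = '7' ∨ c = '8' ∨ c = '9' := by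
  simp only [PySem.Chars.isdigit, Bool.and_eq_true, decide_eq_true_eq, Char.le_def,
    UInt32.le_iff_toNat_le] at h
  have h0 : ('0').val.toNat = 48 := by decide
  have h9 : ('9').val.toNat = 57 := by decide
  have hv : c.val.toNat = 48 ∨ c.val.toNat = 49 ∨ c.val.toNat = 50 ∨ c.val.toNat = 51 ∨ c.val.toNat = 52 ∨ c.val.toNat = 53 ∨ c.val.toNat = 54 ∨ c.val.toNat = 55 ∨ c.val.toNat = 56 ∨ c.val.toNat = 57 := by
    omega
  rcases hv with h|h|h|h|h|h|h|h|h|h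
  · exact Or.inl (char_eq_of_val_toNat _ _ h)
  · exact Or.inr (Or.inl (char_eq_of_val_toNat _ _ h))
  · exact Or.inr (Or.inr (Or.inl (char_eq_of_val_toNat _ _ h)))
  · exact Or.inr (Or.inr (Or.inr (Or.inl (char_eq_of_val_toNat _ _ h))))
  · exact Or.inr (Or.inr (Or.inr (Or.inr (Or.inl (char_eq_of_val_toNat _ _ h)))))
  · exact Or.inr (Or.inr (Or.inr (Or.inr (Or.inr (Or.inl (char_eq_of_val_toNat _ _ h))))))
  · exact Or.inr (Or.inr (Or.inr (Or.inr (Or.inr (Or.inr (Or.inl (char_eq_of_val_toNat _ _ h)))))))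
  · exact Or.inr (Or.inr (Or.inr (Or.inr (Or.inr (Or.inr (Or.inr (Or.inl (char_eq_of_val_toNat _ _ h))))))))
  · exact Or.inr (Or.inr (Or.inr (Or.inr (Or.inr (Or.inr (Or.inr (Or.inr (Or.inl (char_eq_of_val_toNat _ _ h)))))))))
  · exact Or.inr (Or.inr (Or.inr (Or.inr (Or.inr (Or.inr (Or.inr (Or.inr (Or.inr (char_eq_of_val_toNat _ _ h)))))))))

theorem ofChars_digit (c : Char) (h : PySem.Chars.isdigit c = true) :
    PySem.Int.ofChars? [c] = some ((c.toNat : Int) - 48) := by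
  rcases digit_cases c h with h|h|h|h|h|h|h|h|h|h <;> subst h <;> decide

theorem eqzero_digit (c : Char) (h : PySem.Chars.isdigit c = true) :
    (((c.toNat : Int) - 48) == 0) = (c == '0') := by
  rcases digit_cases c h with h|h|h|h|h|h|h|h|h|h <;> subst h <;> decide

theorem keyZero_digit (c : Char) (h : PySem.Chars.isdigit c = true) :
    keyZero c = (c == '0') := by
  simp only [keyZero, ofChars_digit c h, eqzero_digit c h]

-- reference recursion for A's loop (state = the remaining list and the ones-counter)
def refA : List Char → Int → List Char
  | [], _ => []
  | c :: cs, k =>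
    if c == '0' then c :: refA cs 0
    else if k + 1 == 3 then '1' :: refA cs 0 else '0' :: refA cs (k + 1)

theorem foldA_eq (l : List Char) : ∀ (k : Int) (acc : List Char),
    (∀ c ∈ l, PySem.Chars.isdigit c = true) →
    (l.foldl (fun (st : List Char × Int) n =>
      match PySem.Int.ofChars? [n] with
      | none => st
      | some v =>
        if v == 0 then (st.1 ++ [n], 0)
        else
          let count_ones := st.2 + 1
          if count_ones == 3 then (st.1 ++ ['1'], 0) else (st.1 ++ ['0'], count_ones))
      (acc, k)).1 = acc ++ refA l k := by
  induction l with
  | nil => intro k acc _; simp [refA]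
  | cons c cs ih =>
    intro k acc hall
    have hc : PySem.Chars.isdigit c = true := hall c (by simp)
    have hcs : ∀ d ∈ cs, PySem.Chars.isdigit d = true := fun d hd => hall d (by simp [hd])
    simp only [List.foldl_cons, ofChars_digit c hc, eqzero_digit c hc]
    by_cases hz : c = '0'
    · simp only [hz, beq_self_eq_true, if_true, ih 0 (acc ++ ['0']) hcs, refA]
      simp
    · have hz' : (c == '0') = false := by simp [hz]
      simp only [hz', Bool.false_eq_true, if_false]
      by_cases h3 : (k + 1 == 3) = true
      · simp only [h3, if_true, ih 0 (acc ++ ['1']) hcs, refA, hz']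
        simp
      · simp only [Bool.not_eq_true] at h3
        simp only [h3, Bool.false_eq_true, if_false, ih (k + 1) (acc ++ ['0']) hcs, refA, hz']
        simp

theorem refA_zeros (run : List Char) : ∀ rest, (∀ d ∈ run, d = '0') →
    refA (run ++ rest) 0 = List.replicate run.length '0' ++ refA rest 0 := by
  induction run with
  | nil => intro rest _; simp
  | cons c run' ih =>
    intro rest hall
    have hc : c = '0' := hall c (by simp)
    have h' : ∀ d ∈ run', d = '0' := fun d hd => hall d (by simp [hd])
    simp [refA, hc, ih rest h', List.replicate_succ]

theorem refA_ones (run : List Char) : ∀ rest (j : Nat), j < 3 →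
    (∀ d ∈ run, d ≠ '0') → (rest = [] ∨ ∃ t, rest = '0' :: t) →
    refA (run ++ rest) (j : Int)
      = (List.range run.length).map (fun i => if (j + i + 1) % 3 == 0 then '1' else '0')
        ++ refA rest 0 := by
  induction run with
  | nil =>
    intro rest j _ _ hrest
    rcases hrest with h | ⟨t, h⟩ <;> subst h <;> simp [refA]
  | cons c run' ih =>
    intro rest j hj hall hrest
    have hc : (c == '0') = false := by simp [hall c (by simp)]
    have h' : ∀ d ∈ run', d ≠ '0' := fun d hd => hall d (by simp [hd])
    simp only [List.cons_append, refA, hc, Bool.false_eq_true, if_false,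
      List.length_cons, List.range_succ_eq_map, List.map_cons, List.map_map]
    by_cases h2 : j = 2
    · subst h2
      have hih := ih rest 0 (by omega) h' hrest
      simp only [Nat.cast_zero] at hih
      rw [if_pos (by decide), hih]
      have hf : ∀ i : Nat, ((2 + (i + 1) + 1) % 3 == 0) = ((0 + i + 1) % 3 == 0) := by
        intro i
        have h : (2 + (i + 1) + 1) % 3 = (0 + i + 1) % 3 := by omega
        rw [h]
      simp only [Function.comp_def, Nat.succ_eq_add_one, hf]
      simp
    · have h3 : ¬(((j : Int) + 1 == 3) = true) := by
        simp only [beq_iff_eq]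
        intro h
        omega
      rw [if_neg h3]
      have hcast : ((j : Int) + 1) = ((j + 1 : Nat) : Int) := by push_cast; ring
      rw [hcast, ih rest (j + 1) (by omega) h' hrest]
      have hf : ∀ i : Nat, ((j + (i + 1) + 1) % 3 == 0) = (((j + 1) + i + 1) % 3 == 0) := by
        intro i
        have : (j + (i + 1) + 1) % 3 = ((j + 1) + i + 1) % 3 := by omega
        rw [this]
      have hj0 : ((j + 0 + 1) % 3 == 0) = false := by
        simp only [Nat.add_zero, beq_eq_false_iff_ne, ne_eq]
        omega
      simp only [Function.comp_def, Nat.succ_eq_add_one, hf, hj0]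
      simp

theorem dropWhile_head_false {p : Char → Bool} : ∀ (l : List Char) (d : Char) (t : List Char),
    l.dropWhile p = d :: t → p d = false := by
  intro l
  induction l with
  | nil => intro d t h; simp at h
  | cons c cs ih =>
    intro d t h
    by_cases hc : p c
    · rw [List.dropWhile_cons_of_pos hc] at h; exact ih d t h
    · rw [List.dropWhile_cons_of_neg hc] at h
      cases h; simpa using hc

theorem refA_eq_goB : ∀ (n : Nat) (l : List Char), l.length ≤ n →
    (∀ c ∈ l, PySem.Chars.isdigit c = true) → refA l 0 = goB l := by
  intro n
  induction n with
  | zero =>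
    intro l hl _
    have : l = [] := List.eq_nil_of_length_eq_zero (Nat.le_zero.mp hl)
    subst this; simp [refA, goB]
  | succ n ih =>
    intro l hl hall
    cases l with
    | nil => simp [refA, goB]
    | cons c cs =>
      have hc : PySem.Chars.isdigit c = true := hall c (by simp)
      have hcs : ∀ d ∈ cs, PySem.Chars.isdigit d = true := fun d hd => hall d (by simp [hd])
      have hz : keyZero c = (c == '0') := keyZero_digit c hc
      rw [goB]
      set p := fun d => keyZero d == keyZero c with hp
      have hsplit : cs.takeWhile p ++ cs.dropWhile p = cs := List.takeWhile_append_dropWhile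
      have hrest_len : (cs.dropWhile p).length ≤ n := by
        have := List.length_dropWhile_le p cs
        simp only [List.length_cons] at hl
        omega
      have hrest_dig : ∀ d ∈ cs.dropWhile p, PySem.Chars.isdigit d = true :=
        fun d hd => hcs d ((List.dropWhile_sublist p (l := cs)).mem hd)
      have hIH : refA (cs.dropWhile p) 0 = goB (cs.dropWhile p) := ih _ hrest_len hrest_dig
      have hrun_mem : ∀ d ∈ cs.takeWhile p, (d == '0') = (c == '0') := by
        intro d hd
        have hpd : p d = true := List.mem_takeWhile_imp hd
        have hddig : PySem.Chars.isdigit d = true :=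
          hcs d ((List.takeWhile_sublist p (l := cs)).mem hd)
        simp only [hp, keyZero_digit d hddig, hz, beq_iff_eq] at hpd
        simp [hpd]
      by_cases hc0 : c = '0'
      · -- zero run
        subst hc0
        have hrun0 : ∀ d ∈ cs.takeWhile p, d = '0' := by
          intro d hd
          have := hrun_mem d hd
          simpa using this
        have : refA ('0' :: cs) 0 = '0' :: refA (cs.takeWhile p ++ cs.dropWhile p) 0 := by
          rw [hsplit]; simp [refA]
        rw [this, refA_zeros _ _ hrun0, hIH]
        have hzt : keyZero '0' = true := by rw [hz]; simp
        simp only [emitRun, hzt, if_true, Nat.add_comm 1, List.replicate_succ, List.cons_append]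
      · -- nonzero run
        have hkc : keyZero c = false := by rw [hz]; simp [hc0]
        have hrun1 : ∀ d ∈ (c :: cs.takeWhile p), d ≠ '0' := by
          intro d hd
          rcases List.mem_cons.mp hd with h | h
          · subst h; exact hc0
          · intro he
            have := hrun_mem d h
            simp [he, hc0] at this
        have hrest01 : cs.dropWhile p = [] ∨ ∃ t, cs.dropWhile p = '0' :: t := by
          cases hdrop : cs.dropWhile p with
          | nil => exact Or.inl rfl
          | cons d t =>
            refine Or.inr ⟨t, ?_⟩
            have hpd : p d = false := dropWhile_head_false cs d t hdrop
            have hddig : PySem.Chars.isdigit d = true := hrest_dig d (by rw [hdrop]; simp)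
            rw [hp] at hpd
            simp only [keyZero_digit d hddig, hkc] at hpd
            have hd0 : d = '0' := by
              by_cases hb : d = '0'
              · exact hb
              · exfalso
                have hbf : (d == '0') = false := by simp [hb]
                rw [hbf] at hpd
                simp at hpd
            rw [hd0]
        have heq : refA (c :: cs) 0 = refA ((c :: cs.takeWhile p) ++ cs.dropWhile p) 0 := by
          simp [hsplit]
        rw [heq]
        have hones := refA_ones (c :: cs.takeWhile p) (cs.dropWhile p) 0 (by omega) hrun1 hrest01
        simp only [Nat.cast_zero] at hones
        rw [hones, hIH]
        have hlen : (c :: cs.takeWhile p).length = 1 + (cs.takeWhile p).length := by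
          simp [Nat.add_comm]
        rw [hlen]
        simp [emitRun, hkc]

-- ===== VERDICT (by name: the statement is the Claim_ definition above) =====
theorem onesAndZeros_spec : Claim_equal_onesAndZeros := by
  intro num _ hpre
  have hall : ∀ c ∈ num.toList, PySem.Chars.isdigit c = true := by
    have := hpre
    unfold Pre_onesAndZeros at this
    simpa [List.all_eq_true] using this
  unfold Spec_onesAndZeros onesAndZeros onesAndZeros_alt
  have h1 := foldA_eq num.toList 0 [] hall
  simp only [List.nil_append] at h1
  simp only [h1, refA_eq_goB num.toList.length num.toList le_rfl hall]
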